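-- pv_equiv track=rewrite | github.com/SansPapyrus683/green-new-deal-heckers | 2016/day7/actually.py | abaAndBAB
-- ===== SOURCE A (Python) =====
-- def abaAndBAB(out: [str], inside: [str]):
--     for o in out:
--         for i in range(2, len(o)):
--             if o[i] == o[i - 2] and o[i] != o[i - 1]:
--                 for ins in inside:
--                     if f"{o[i - 1]}{o[i]}{o[i - 1]}" in ins:
--                         return True
--     return False
-- ===== SOURCE B (Python) =====
-- def abaAndBAB(out, inside):
--     # Index ABAs from `out` and all char triples of `inside`, then one set test.
--     cands = set()
--     for o in out:
--         for x, y, z in zip(o, o[1:], o[2:]):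
--             if z == x != y:
--                 cands.add(y + z + y)
--     subs = set()
--     for ins in inside:
--         for x, y, z in zip(ins, ins[1:], ins[2:]):
--             subs.add(x + y + z)
--     return not cands.isdisjoint(subs)
-- ===== Notes on version B (the rewrite author's own statement) =====
-- stated objective: alternative
-- what changed: Replaces the nested scan with early return (every ABA rescans all of inside with a substring search) by two independent index-building passes -- a set of candidate BAB strings from out and a set of all length-3 windows of inside -- finished by one set-disjointness test.
import Mathlib
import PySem

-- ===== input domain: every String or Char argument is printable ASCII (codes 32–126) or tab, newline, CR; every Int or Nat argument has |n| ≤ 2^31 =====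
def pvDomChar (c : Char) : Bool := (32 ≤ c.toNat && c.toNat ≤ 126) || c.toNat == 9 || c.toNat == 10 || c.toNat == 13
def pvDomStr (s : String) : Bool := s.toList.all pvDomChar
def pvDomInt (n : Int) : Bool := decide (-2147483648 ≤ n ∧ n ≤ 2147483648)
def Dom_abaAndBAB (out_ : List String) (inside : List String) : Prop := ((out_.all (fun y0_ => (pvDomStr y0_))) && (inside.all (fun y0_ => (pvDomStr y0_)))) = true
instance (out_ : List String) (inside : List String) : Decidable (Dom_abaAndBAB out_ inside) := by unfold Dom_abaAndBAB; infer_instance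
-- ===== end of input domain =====

-- B replaces A's nested scan-with-early-return by two independent index-building passes
-- (a set of candidate BABs from out_, a set of length-3 windows of inside) and one
-- set-disjointness test. Objective: alternative.

-- ===== PORT A =====
def abaAndBAB (out_ : List String) (inside : List String) : Bool :=
  out_.any fun o =>
    (PySem.List.pyRange 2 (PySem.Str.len o) 1).any fun i =>
      match PySem.Str.pyGet? o i, PySem.Str.pyGet? o (i - 1), PySem.Str.pyGet? o (i - 2) with
      | some ci, some ci1, some ci2 =>
          if ci == ci2 && ci != ci1 then
            inside.any fun ins => PySem.Str.isIn (String.ofList [ci1, ci, ci1]) ins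
          else false
      | _, _, _ => false      -- unreachable: 2 ≤ i < len o, so all three indices are in range

-- ===== PORT B =====
-- zip(s, s[1:], s[2:]) is ported as zipping the char list with its two drops (exact for
-- the nonnegative slices s[1:], s[2:]); string concatenation x + y + z is String.ofList [x, y, z].
def abaAndBAB_alt (out_ : List String) (inside : List String) : Bool :=
  let cands := out_.foldl (fun s o =>
      (o.toList.zip ((o.toList.drop 1).zip (o.toList.drop 2))).foldl
        (fun s t =>
          if t.2.2 == t.1 && t.2.2 != t.2.1 then
            PySem.Set.add s (String.ofList [t.2.1, t.2.2, t.2.1])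
          else s) s)
    PySem.Set.empty
  let subs := inside.foldl (fun s ins =>
      (ins.toList.zip ((ins.toList.drop 1).zip (ins.toList.drop 2))).foldl
        (fun s t => PySem.Set.add s (String.ofList [t.1, t.2.1, t.2.2])) s)
    PySem.Set.empty
  !(PySem.Set.isdisjoint cands subs)

-- ===== PRECONDITION & SPEC =====
def Spec_abaAndBAB (out_ : List String) (inside : List String) (out : Bool) : Prop := out = abaAndBAB_alt out_ inside
instance (out_ : List String) (inside : List String) (out : Bool) : Decidable (Spec_abaAndBAB out_ inside out) := by unfold Spec_abaAndBAB; infer_instance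

-- ===== CLAIM (what is proved, stated in full; the proofs are below) =====
def Claim_equal_abaAndBAB : Prop := ∀ (out_ : List String) (inside : List String), Dom_abaAndBAB out_ inside → Spec_abaAndBAB out_ inside (abaAndBAB out_ inside)

-- ===== LEMMAS AND PROOFS =====

/-- The list of consecutive character triples, the contents of B's zips. -/
def pvTriples : List Char → List (Char × Char × Char)
  | x :: y :: z :: rest => (x, y, z) :: pvTriples (y :: z :: rest)
  | _ => []

theorem pvZip_eq_triples (l : List Char) :
    l.zip ((l.drop 1).zip (l.drop 2)) = pvTriples l := by
  induction l with
  | nil => simp [pvTriples]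
  | cons x t ih =>
    match t with
    | [] => simp [pvTriples]
    | [y] => simp [pvTriples]
    | y :: z :: r => simpa [pvTriples] using ih

theorem mem_triples_iff_infix (l : List Char) (p q r : Char) :
    (p, q, r) ∈ pvTriples l ↔ [p, q, r] <:+: l := by
  induction l with
  | nil => simp [pvTriples]
  | cons x t ih =>
    match t with
    | [] =>
      simp only [pvTriples, List.not_mem_nil, false_iff]
      intro h; have := h.length_le; simp at this
    | [y] =>
      simp only [pvTriples, List.not_mem_nil, false_iff]
      intro h; have := h.length_le; simp at this
    | y :: z :: rest =>
      rw [pvTriples, List.mem_cons, List.infix_cons_iff, ih]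
      constructor
      · rintro (h | h)
        · left
          obtain ⟨rfl, rfl, rfl⟩ := Prod.mk.injEq .. ▸ h
          simp [List.cons_prefix_cons]
        · right; exact h
      · rintro (h | h)
        · left
          rw [List.cons_prefix_cons] at h; obtain ⟨rfl, h⟩ := h
          rw [List.cons_prefix_cons] at h; obtain ⟨rfl, h⟩ := h
          rw [List.cons_prefix_cons] at h; obtain ⟨rfl, _⟩ := h
          rfl
        · right; exact h

theorem mem_triples_iff_getElem (l : List Char) (p q r : Char) :
    (p, q, r) ∈ pvTriples l ↔
      ∃ j : Nat, l[j]? = some p ∧ l[j + 1]? = some q ∧ l[j + 2]? = some r := by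
  induction l with
  | nil => simp [pvTriples]
  | cons x t ih =>
    match t with
    | [] =>
      simp only [pvTriples, List.not_mem_nil, false_iff]
      rintro ⟨j, -, -, h⟩
      rcases j with _ | j <;> simp at h
    | [y] =>
      simp only [pvTriples, List.not_mem_nil, false_iff]
      rintro ⟨j, -, -, h⟩
      rcases j with _ | j <;> simp at h
    | y :: z :: rest =>
      rw [pvTriples, List.mem_cons, ih]
      constructor
      · rintro (h | ⟨j, h1, h2, h3⟩)
        · obtain ⟨rfl, rfl, rfl⟩ := Prod.mk.injEq .. ▸ h
          exact ⟨0, by simp, by simp, by simp⟩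
        · exact ⟨j + 1, by simpa using h1, by simpa using h2, by simpa using h3⟩
      · rintro ⟨j, h1, h2, h3⟩
        rcases j with _ | j
        · left
          simp at h1 h2 h3
          simp [h1, h2, h3]
        · right
          exact ⟨j, by simpa using h1, by simpa using h2, by simpa using h3⟩

/-- Membership after a fold that conditionally adds generated elements to a set. -/
theorem mem_foldl_set {α : Type} (l : List α) (g : PySem.Set String → α → PySem.Set String)
    (Q : String → α → Prop)
    (hg : ∀ s x a, a ∈ g s x ↔ a ∈ s ∨ Q a x) :
    ∀ (s : PySem.Set String) (a : String), a ∈ l.foldl g s ↔ a ∈ s ∨ ∃ x ∈ l, Q a x := by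
  induction l with
  | nil => simp
  | cons x t ih =>
    intro s a
    rw [List.foldl_cons, ih, hg]
    constructor
    · rintro ((h | h) | ⟨x', hx', h⟩)
      · exact .inl h
      · exact .inr ⟨x, by simp, h⟩
      · exact .inr ⟨x', by simp [hx'], h⟩
    · rintro (h | ⟨x', hx', h⟩)
      · exact .inl (.inl h)
      · rcases List.mem_cons.mp hx' with rfl | hx'
        · exact .inl (.inr h)
        · exact .inr ⟨x', hx', h⟩

/-- What A's inner index loop over one string amounts to. -/
theorem pvInner_iff (o : String) (inside : List String) :
    ((PySem.List.pyRange 2 (PySem.Str.len o) 1).any fun i =>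
      match PySem.Str.pyGet? o i, PySem.Str.pyGet? o (i - 1), PySem.Str.pyGet? o (i - 2) with
      | some ci, some ci1, some ci2 =>
          if ci == ci2 && ci != ci1 then
            inside.any fun ins => PySem.Str.isIn (String.ofList [ci1, ci, ci1]) ins
          else false
      | _, _, _ => false) = true ↔
    ∃ p q r : Char, (p, q, r) ∈ pvTriples o.toList ∧ (r == p && r != q) = true ∧
      (inside.any fun ins => PySem.Str.isIn (String.ofList [q, r, q]) ins) = true := by
  rw [List.any_eq_true]
  constructor
  · rintro ⟨i, hi, hbody⟩
    rw [PySem.List.mem_pyRange_one] at hi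
    have hlen : i < (o.toList.length : Int) := by
      have := hi.2; simpa [PySem.Str.len] using this
    have h2 : 2 ≤ i := hi.1
    have e0 : PySem.Str.pyGet? o i = some o.toList[i.toNat] := by
      simp only [PySem.Str.pyGet?]
      exact PySem.List.pyGet?_eq_some_getElem _ (by omega) hlen
    have e1 : PySem.Str.pyGet? o (i - 1) = some o.toList[(i - 1).toNat] := by
      simp only [PySem.Str.pyGet?]
      exact PySem.List.pyGet?_eq_some_getElem _ (by omega) (by omega)
    have e2 : PySem.Str.pyGet? o (i - 2) = some o.toList[(i - 2).toNat] := by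
      simp only [PySem.Str.pyGet?]
      exact PySem.List.pyGet?_eq_some_getElem _ (by omega) (by omega)
    rw [e0, e1, e2] at hbody
    simp only [] at hbody
    by_cases hc : (o.toList[i.toNat] == o.toList[(i - 2).toNat] &&
        o.toList[i.toNat] != o.toList[(i - 1).toNat]) = true
    · rw [if_pos hc] at hbody
      have hn2 : (i - 2).toNat + 1 = (i - 1).toNat := by omega
      have hn1 : (i - 2).toNat + 2 = i.toNat := by omega
      refine ⟨o.toList[(i - 2).toNat], o.toList[(i - 1).toNat], o.toList[i.toNat],
        (mem_triples_iff_getElem ..).mpr ⟨(i - 2).toNat, ?_, ?_, ?_⟩, hc, hbody⟩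
      · exact List.getElem?_eq_getElem (by omega)
      · rw [hn2]; exact List.getElem?_eq_getElem (by omega)
      · rw [hn1]; exact List.getElem?_eq_getElem (by omega)
    · rw [if_neg hc] at hbody
      exact absurd hbody (by simp)
  · rintro ⟨p, q, r, hmem, hc, hin⟩
    obtain ⟨j, h1, h2, h3⟩ := (mem_triples_iff_getElem ..).mp hmem
    have hj2 : j + 2 < o.toList.length := (List.getElem?_eq_some_iff.mp h3).1
    refine ⟨(j : Int) + 2, ?_, ?_⟩
    · rw [PySem.List.mem_pyRange_one]
      constructor
      · omega
      · simp only [PySem.Str.len]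
        omega
    · have e0 : PySem.Str.pyGet? o ((j : Int) + 2) = some r := by
        have h := PySem.List.pyGet?_eq_some_getElem o.toList (i := (j : Int) + 2) (by omega) (by omega)
        simp only [show ((j : Int) + 2).toNat = j + 2 from by omega] at h
        exact h.trans ((List.getElem?_eq_getElem (by omega)).symm.trans h3)
      have e1 : PySem.Str.pyGet? o ((j : Int) + 2 - 1) = some q := by
        have h := PySem.List.pyGet?_eq_some_getElem o.toList (i := (j : Int) + 2 - 1) (by omega) (by omega)
        simp only [show ((j : Int) + 2 - 1).toNat = j + 1 from by omega] at h
        exact h.trans ((List.getElem?_eq_getElem (by omega)).symm.trans h2)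
      have e2 : PySem.Str.pyGet? o ((j : Int) + 2 - 2) = some p := by
        have h := PySem.List.pyGet?_eq_some_getElem o.toList (i := (j : Int) + 2 - 2) (by omega) (by omega)
        simp only [show ((j : Int) + 2 - 2).toNat = j from by omega] at h
        exact h.trans ((List.getElem?_eq_getElem (by omega)).symm.trans h1)
      rw [e0, e1, e2]
      simp only []
      rw [if_pos hc]
      exact hin

theorem abaAndBAB_true_iff (out_ inside : List String) :
    abaAndBAB out_ inside = true ↔
    ∃ o ∈ out_, ∃ p q r : Char, (p, q, r) ∈ pvTriples o.toList ∧ (r == p && r != q) = true ∧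
      ∃ ins ∈ inside, [q, r, q] <:+: ins.toList := by
  unfold abaAndBAB
  rw [List.any_eq_true]
  refine exists_congr fun o => and_congr_right fun _ => ?_
  rw [pvInner_iff]
  refine exists_congr fun p => exists_congr fun q => exists_congr fun r =>
    and_congr_right fun _ => and_congr_right fun _ => ?_
  rw [List.any_eq_true]
  refine exists_congr fun ins => and_congr_right fun _ => ?_
  rw [PySem.Str.isIn_iff_infix]
  simp

theorem abaAndBAB_alt_true_iff (out_ inside : List String) :
    abaAndBAB_alt out_ inside = true ↔
    ∃ o ∈ out_, ∃ p q r : Char, (p, q, r) ∈ pvTriples o.toList ∧ (r == p && r != q) = true ∧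
      ∃ ins ∈ inside, [q, r, q] <:+: ins.toList := by
  unfold abaAndBAB_alt
  simp only [pvZip_eq_triples]
  rw [Bool.not_eq_eq_eq_not, Bool.not_true, ← Bool.not_eq_true, PySem.Set.isdisjoint_iff]
  push Not
  have hcand := mem_foldl_set out_
      (fun s o => (pvTriples o.toList).foldl
        (fun s t => if t.2.2 == t.1 && t.2.2 != t.2.1 then
            PySem.Set.add s (String.ofList [t.2.1, t.2.2, t.2.1]) else s) s)
      (fun a o => ∃ t ∈ pvTriples o.toList, (t.2.2 == t.1 && t.2.2 != t.2.1) = true ∧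
          a = String.ofList [t.2.1, t.2.2, t.2.1])
      (fun s o a => by
        rw [mem_foldl_set _ _
          (fun a t => (t.2.2 == t.1 && t.2.2 != t.2.1) = true ∧
            a = String.ofList [t.2.1, t.2.2, t.2.1])
          (fun s t a => by
            by_cases h : (t.2.2 == t.1 && t.2.2 != t.2.1) = true
            · rw [if_pos h, PySem.Set.mem_add]
              constructor
              · rintro (hs | rfl)
                · exact .inl hs
                · exact .inr ⟨h, rfl⟩
              · rintro (hs | ⟨-, rfl⟩)
                · exact .inl hs
                · exact .inr rfl
            · rw [if_neg h]
              constructor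
              · exact .inl
              · rintro (hs | ⟨hh, -⟩)
                · exact hs
                · exact absurd hh h)])
  have hsub := mem_foldl_set inside
      (fun s ins => (pvTriples ins.toList).foldl
        (fun s t => PySem.Set.add s (String.ofList [t.1, t.2.1, t.2.2])) s)
      (fun a ins => ∃ t ∈ pvTriples ins.toList, a = String.ofList [t.1, t.2.1, t.2.2])
      (fun s ins a => by
        rw [mem_foldl_set _ _ (fun a t => a = String.ofList [t.1, t.2.1, t.2.2])
          (fun s t a => by rw [PySem.Set.mem_add])])
  constructor
  · rintro ⟨w, hw1, hw2⟩
    rw [hcand] at hw1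
    rw [hsub] at hw2
    rcases hw1 with h | ⟨o, ho, ⟨⟨x, y, z⟩, ht, hc, rfl⟩⟩
    · exact absurd h (by simp [PySem.Set.empty])
    rcases hw2 with h | ⟨ins, hins, ⟨⟨x', y', z'⟩, ht', he⟩⟩
    · exact absurd h (by simp [PySem.Set.empty])
    have h' := congrArg String.toList he
    simp only [String.toList_ofList, List.cons.injEq, and_true] at h'
    obtain ⟨rfl, rfl, rfl⟩ := h'
    refine ⟨o, ho, x, y, z, ht, hc, ins, hins, ?_⟩
    rw [← mem_triples_iff_infix]
    exact ht'
  · rintro ⟨o, ho, p, q, r, ht, hc, ins, hins, hinf⟩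
    refine ⟨String.ofList [q, r, q], ?_, ?_⟩
    · rw [hcand]
      exact .inr ⟨o, ho, (p, q, r), ht, hc, rfl⟩
    · rw [hsub]
      exact .inr ⟨ins, hins, (q, r, q), (mem_triples_iff_infix ..).mpr hinf, rfl⟩

-- ===== VERDICT (by name: the statement is the Claim_ definition above) =====
theorem abaAndBAB_spec : Claim_equal_abaAndBAB := by
  intro out_ inside _
  unfold Spec_abaAndBAB
  rw [Bool.eq_iff_iff, abaAndBAB_true_iff, abaAndBAB_alt_true_iff]
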